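-- pv_equiv track=rewrite | github.com/HyNlity/Self-Evolving-Agents-for-Scientific-Laws | playground/hamilton/core/exp.py | _collect_skill_script_stats
-- ===== SOURCE A (Python) =====
-- from typing import Any
--
-- def _collect_skill_script_stats(script_records: list[dict[str, Any]]) -> dict[str, dict[str, int]]:
--     """Count per-script run_script calls and success counts from trajectory steps."""
--     stats: dict[str, dict[str, int]] = {}
--     for rec in script_records:
--         script_name = str(rec.get("script_name", "") or "").strip()
--         if not script_name:
--             continue
--         stat = stats.setdefault(script_name, {"calls": 0, "success_calls": 0})
--         stat["calls"] += 1
--         if bool(rec.get("success")):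
--             stat["success_calls"] += 1
--
--     return stats
-- ===== SOURCE B (Python) =====
-- from collections import Counter
--
--
-- def _collect_skill_script_stats(script_records):
--     """Count per-script run_script calls and success counts from trajectory steps."""
--     pairs = [(str(rec.get("script_name", "") or "").strip(), bool(rec.get("success")))
--              for rec in script_records]
--     calls = Counter(name for name, _ok in pairs if name)
--     success = Counter(name for name, ok in pairs if name and ok)
--     return {name: {"calls": calls[name], "success_calls": success[name]} for name in calls}
-- ===== Notes on version B (the rewrite author's own statement) =====
-- stated objective: idiomatic
-- what changed: Replaces the incremental nested-dict mutation with two passes: normalize once into (name, success) pairs, build two Counters (all calls, successful calls), and assemble the result with a comprehension over the calls Counter.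
import Mathlib
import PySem

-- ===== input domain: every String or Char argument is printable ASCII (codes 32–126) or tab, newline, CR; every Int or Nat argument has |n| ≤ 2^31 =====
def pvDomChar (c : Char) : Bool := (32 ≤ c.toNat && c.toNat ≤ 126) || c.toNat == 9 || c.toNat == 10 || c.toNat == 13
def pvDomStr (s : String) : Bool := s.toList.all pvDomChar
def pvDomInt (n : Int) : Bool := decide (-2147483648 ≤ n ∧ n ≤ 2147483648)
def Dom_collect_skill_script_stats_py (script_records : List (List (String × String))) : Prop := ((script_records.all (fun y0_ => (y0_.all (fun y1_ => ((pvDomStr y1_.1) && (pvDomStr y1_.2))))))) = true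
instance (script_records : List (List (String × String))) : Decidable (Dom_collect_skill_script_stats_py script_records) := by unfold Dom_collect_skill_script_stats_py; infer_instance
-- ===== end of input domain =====

-- B replaces A's incremental nested-dict mutation by a normalize-then-count decomposition
-- (two Counters combined in a final comprehension); objective: more idiomatic, same cost.

-- ===== PORT A =====
-- bool(rec.get("success")) on a string-valued record is: key absent → False, "" → False, else True,
-- i.e. getD rec "success" "" ≠ ""; str(… or "") is the identity on the string values admitted here.
def collect_skill_script_stats_py (script_records : List (List (String × String))) : List (String × List (String × Int)) :=
  let stats : PySem.Dict String (PySem.Dict String Int) :=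
    script_records.foldl (fun stats rec =>
      let script_name := PySem.Str.strip (PySem.Dict.getD (PySem.Dict.mk rec) "script_name" "")
      if script_name = "" then stats
      else
        let stats := stats.setdefault script_name (PySem.Dict.mk [("calls", 0), ("success_calls", 0)])
        let stat := stats.getD script_name (PySem.Dict.mk [])
        let stat := stat.insert "calls" (stat.getD "calls" 0 + 1)
        let stat :=
          if PySem.Dict.getD (PySem.Dict.mk rec) "success" "" ≠ "" then
            stat.insert "success_calls" (stat.getD "success_calls" 0 + 1)
          else stat
        stats.insert script_name stat) PySem.Dict.empty
  stats.items.map (fun p => (p.1, p.2.items))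

-- ===== PORT B =====
def collect_skill_script_stats_py_alt (script_records : List (List (String × String))) : List (String × List (String × Int)) :=
  let pairs : List (String × Bool) :=
    script_records.map (fun rec =>
      (PySem.Str.strip (PySem.Dict.getD (PySem.Dict.mk rec) "script_name" ""),
       PySem.Dict.getD (PySem.Dict.mk rec) "success" "" != ""))
  let calls := PySem.Dict.counter ((pairs.filter (fun p => p.1 != "")).map (·.1))
  let success := PySem.Dict.counter ((pairs.filter (fun p => p.1 != "" && p.2)).map (·.1))
  calls.keys.map (fun name => (name, [("calls", calls.getD name 0), ("success_calls", success.getD name 0)]))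

-- ===== PRECONDITION & SPEC =====
def Spec_collect_skill_script_stats_py (script_records : List (List (String × String))) (out : List (String × List (String × Int))) : Prop := out = collect_skill_script_stats_py_alt script_records
instance (script_records : List (List (String × String))) (out : List (String × List (String × Int))) : Decidable (Spec_collect_skill_script_stats_py script_records out) := by unfold Spec_collect_skill_script_stats_py; infer_instance

-- ===== CLAIM (what is proved, stated in full; the proofs are below) =====
def Claim_equal_collect_skill_script_stats_py : Prop := ∀ (script_records : List (List (String × String))), Dom_collect_skill_script_stats_py script_records → Spec_collect_skill_script_stats_py script_records (collect_skill_script_stats_py script_records)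

-- ===== LEMMAS AND PROOFS =====

def pvF (rec : List (String × String)) : String × Bool :=
  (PySem.Str.strip (PySem.Dict.getD (PySem.Dict.mk rec) "script_name" ""),
   PySem.Dict.getD (PySem.Dict.mk rec) "success" "" != "")

def pvStep (stats : PySem.Dict String (PySem.Dict String Int)) (rec : List (String × String)) :
    PySem.Dict String (PySem.Dict String Int) :=
  let script_name := PySem.Str.strip (PySem.Dict.getD (PySem.Dict.mk rec) "script_name" "")
  if script_name = "" then stats
  else
    let stats := stats.setdefault script_name (PySem.Dict.mk [("calls", 0), ("success_calls", 0)])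
    let stat := stats.getD script_name (PySem.Dict.mk [])
    let stat := stat.insert "calls" (stat.getD "calls" 0 + 1)
    let stat :=
      if PySem.Dict.getD (PySem.Dict.mk rec) "success" "" ≠ "" then
        stat.insert "success_calls" (stat.getD "success_calls" 0 + 1)
      else stat
    stats.insert script_name stat

lemma pvStep_eq (d : PySem.Dict String (PySem.Dict String Int)) (r : List (String × String)) :
    pvStep d r =
      if (pvF r).1 = "" then d else
        let stats := d.setdefault (pvF r).1 (PySem.Dict.mk [("calls", 0), ("success_calls", 0)])
        let stat := stats.getD (pvF r).1 (PySem.Dict.mk [])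
        let stat := stat.insert "calls" (stat.getD "calls" 0 + 1)
        let stat := if (pvF r).2 then stat.insert "success_calls" (stat.getD "success_calls" 0 + 1) else stat
        stats.insert (pvF r).1 stat := by
  simp only [pvStep, pvF, bne_iff_ne]

def pvNames (rs : List (List (String × String))) : List String :=
  ((rs.map pvF).filter (fun p => p.1 != "")).map (·.1)

def pvSNames (rs : List (List (String × String))) : List String :=
  ((rs.map pvF).filter (fun p => p.1 != "" && p.2)).map (·.1)

def pvG (rs : List (List (String × String))) (n : String) : String × PySem.Dict String Int :=
  (n, PySem.Dict.mk [("calls", ((pvNames rs).count n : Int)),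
                     ("success_calls", ((pvSNames rs).count n : Int))])

def pvModel (rs : List (List (String × String))) : PySem.Dict String (PySem.Dict String Int) :=
  PySem.Dict.mk ((PySem.Set.ofList (pvNames rs)).map (pvG rs))

lemma pvNames_append (rs : List (List (String × String))) (r : List (String × String)) :
    pvNames (rs ++ [r]) = pvNames rs ++ (if (pvF r).1 != "" then [(pvF r).1] else []) := by
  simp only [pvNames, List.map_append, List.filter_append]
  by_cases h : (pvF r).1 != "" <;> simp [h]

lemma pvSNames_append (rs : List (List (String × String))) (r : List (String × String)) :
    pvSNames (rs ++ [r]) = pvSNames rs ++ (if (pvF r).1 != "" && (pvF r).2 then [(pvF r).1] else []) := by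
  simp only [pvSNames, List.map_append, List.filter_append]
  by_cases h : (pvF r).1 != "" && (pvF r).2 <;> simp [h]

lemma pvSNames_subset (rs : List (List (String × String))) {x : String} (h : x ∈ pvSNames rs) :
    x ∈ pvNames rs := by
  simp only [pvSNames, pvNames, List.mem_map, List.mem_filter] at h ⊢
  rcases h with ⟨p, ⟨hp, hc⟩, rfl⟩
  exact ⟨p, ⟨hp, by simpa using (Bool.and_elim_left hc)⟩, rfl⟩

lemma pvModel_keys (rs : List (List (String × String))) :
    (pvModel rs).keys = PySem.Set.ofList (pvNames rs) := by
  simp only [pvModel, PySem.Dict.keys, List.map_map]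
  simp [pvG, Function.comp_def]

lemma pvModel_nodup (rs : List (List (String × String))) : (pvModel rs).keys.Nodup := by
  rw [pvModel_keys]; exact PySem.Set.nodup_ofList _

lemma pvModel_contains (rs : List (List (String × String))) (n : String) :
    (pvModel rs).contains n = decide (n ∈ pvNames rs) := by
  rw [PySem.Dict.contains_eq_decide_mem_keys, pvModel_keys]
  simp [PySem.Set.mem_ofList]

lemma pvModel_getD (rs : List (List (String × String))) (n : String) (h : n ∈ pvNames rs) :
    (pvModel rs).getD n (PySem.Dict.mk []) =
      PySem.Dict.mk [("calls", ((pvNames rs).count n : Int)),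
                     ("success_calls", ((pvSNames rs).count n : Int))] := by
  have hmem : pvG rs n ∈ (pvModel rs).items :=
    List.mem_map_of_mem (by simp [PySem.Set.mem_ofList, h])
  exact PySem.Dict.getD_of_mem_items _ hmem (pvModel_nodup rs) _

lemma pvLit_getD_calls (c s : Int) :
    (PySem.Dict.mk [("calls", c), ("success_calls", s)]).getD "calls" 0 = c := by
  simp [PySem.Dict.getD_eq_get?_getD, PySem.Dict.get?_mk_cons]

lemma pvLit_getD_succ (c s : Int) :
    (PySem.Dict.mk [("calls", c), ("success_calls", s)]).getD "success_calls" 0 = s := by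
  simp [PySem.Dict.getD_eq_get?_getD, PySem.Dict.get?_mk_cons]

lemma pvLit_insert_calls (c s v : Int) :
    (PySem.Dict.mk [("calls", c), ("success_calls", s)]).insert "calls" v
      = PySem.Dict.mk [("calls", v), ("success_calls", s)] := by
  apply PySem.Dict.ext
  simp [PySem.Dict.items_insert_of_contains]

lemma pvLit_insert_succ (c s v : Int) :
    (PySem.Dict.mk [("calls", c), ("success_calls", s)]).insert "success_calls" v
      = PySem.Dict.mk [("calls", c), ("success_calls", v)] := by
  apply PySem.Dict.ext
  simp [PySem.Dict.items_insert_of_contains]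

lemma pvStep_model (rs : List (List (String × String))) (r : List (String × String)) :
    pvStep (pvModel rs) r = pvModel (rs ++ [r]) := by
  rw [pvStep_eq]
  by_cases h0 : (pvF r).1 = ""
  · rw [if_pos h0]
    unfold pvModel pvG
    rw [pvNames_append, pvSNames_append]
    simp [h0]
  · rw [if_neg h0]
    have hbne : ((pvF r).1 != "") = true := by simp [h0]
    by_cases hm : (pvF r).1 ∈ pvNames rs
    · -- existing key: setdefault is a no-op, insert overwrites in place
      have hc : (pvModel rs).contains (pvF r).1 = true := by
        rw [pvModel_contains]; simp [hm]
      dsimp only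
      rw [PySem.Dict.setdefault_of_contains (h := hc)]
      rw [pvModel_getD rs _ hm, pvLit_getD_calls, pvLit_insert_calls]
      rw [pvLit_getD_succ, pvLit_insert_succ]
      have hset : PySem.Set.ofList (pvNames (rs ++ [r])) = PySem.Set.ofList (pvNames rs) := by
        rw [pvNames_append, hbne, if_pos rfl]
        simp [PySem.Set.ofList_append, PySem.Set.update_cons, PySem.Set.update_nil,
              PySem.Set.add, PySem.Set.mem_ofList, hm]
      apply PySem.Dict.ext
      rw [PySem.Dict.items_insert_of_contains (h := hc)]
      show (List.map (pvG rs) (PySem.Set.ofList (pvNames rs))).map _ = List.map (pvG (rs ++ [r])) (PySem.Set.ofList (pvNames (rs ++ [r])))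
      rw [hset, List.map_map]
      apply List.map_congr_left
      intro k hk
      have hkN : k ∈ pvNames rs := (PySem.Set.mem_ofList _ _).mp hk
      by_cases hkn : k = (pvF r).1
      · subst hkn
        simp only [Function.comp_apply, pvG, beq_self_eq_true, if_pos]
        have h1 : (pvNames (rs ++ [r])).count (pvF r).1 = (pvNames rs).count (pvF r).1 + 1 := by
          rw [pvNames_append, hbne, if_pos rfl, List.count_append]
          simp
        have h2 : (pvSNames (rs ++ [r])).count (pvF r).1 = (pvSNames rs).count (pvF r).1 + (if (pvF r).2 then 1 else 0) := by
          rw [pvSNames_append, hbne, Bool.true_and, List.count_append]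
          by_cases hb : (pvF r).2 <;> simp [hb]
        rw [h1, h2]
        by_cases hb : (pvF r).2 <;> simp [hb]
      · have hbeq : ((pvG rs k).1 == (pvF r).1) = false := by simp [pvG, hkn]
        simp only [Function.comp_apply, hbeq, if_neg, Bool.false_eq_true, not_false_iff]
        have h1 : (pvNames (rs ++ [r])).count k = (pvNames rs).count k := by
          rw [pvNames_append, hbne, if_pos rfl, List.count_append]
          simp [Ne.symm hkn]
        have h2 : (pvSNames (rs ++ [r])).count k = (pvSNames rs).count k := by
          rw [pvSNames_append, List.count_append]
          by_cases hb : ((pvF r).1 != "" && (pvF r).2) <;> simp [hb, Ne.symm hkn]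
        simp [pvG, h1, h2]
    · -- fresh key: setdefault inserts the zero row, the final insert overwrites it
      have hc : (pvModel rs).contains (pvF r).1 = false := by
        rw [pvModel_contains]; simp [hm]
      dsimp only
      rw [PySem.Dict.setdefault_of_not_contains (h := hc)]
      rw [PySem.Dict.getD_insert_self]
      rw [pvLit_getD_calls, pvLit_insert_calls, pvLit_getD_succ, pvLit_insert_succ]
      rw [PySem.Dict.insert_insert_self]
      have hsn : (pvF r).1 ∉ pvSNames rs := fun h => hm (pvSNames_subset rs h)
      have hset : PySem.Set.ofList (pvNames (rs ++ [r])) = PySem.Set.ofList (pvNames rs) ++ [(pvF r).1] := by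
        rw [pvNames_append, hbne, if_pos rfl]
        simp [PySem.Set.ofList_append, PySem.Set.update_cons, PySem.Set.update_nil,
              PySem.Set.add, PySem.Set.mem_ofList, hm]
      apply PySem.Dict.ext
      rw [PySem.Dict.items_insert_of_not_contains (h := hc)]
      show (List.map (pvG rs) (PySem.Set.ofList (pvNames rs))) ++ [((pvF r).1, _)] = List.map (pvG (rs ++ [r])) (PySem.Set.ofList (pvNames (rs ++ [r])))
      rw [hset, List.map_append]
      congr 1
      · apply List.map_congr_left
        intro k hk
        have hkN : k ∈ pvNames rs := (PySem.Set.mem_ofList _ _).mp hk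
        have hkn : k ≠ (pvF r).1 := fun h => hm (h ▸ hkN)
        have h1 : (pvNames (rs ++ [r])).count k = (pvNames rs).count k := by
          rw [pvNames_append, hbne, if_pos rfl, List.count_append]
          simp [Ne.symm hkn]
        have h2 : (pvSNames (rs ++ [r])).count k = (pvSNames rs).count k := by
          rw [pvSNames_append, List.count_append]
          by_cases hb : ((pvF r).1 != "" && (pvF r).2) <;> simp [hb, Ne.symm hkn]
        simp [pvG, h1, h2]
      · have h1 : (pvNames (rs ++ [r])).count (pvF r).1 = 1 := by
          rw [pvNames_append, hbne, if_pos rfl, List.count_append, List.count_eq_zero.mpr hm]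
          simp
        have h2 : (pvSNames (rs ++ [r])).count (pvF r).1 = (if (pvF r).2 then 1 else 0) := by
          rw [pvSNames_append, hbne, Bool.true_and, List.count_append, List.count_eq_zero.mpr hsn]
          by_cases hb : (pvF r).2
          · simp [hb]
          · simp [hb]
        simp only [List.map_cons, List.map_nil, pvG, h1, h2]
        by_cases hb : (pvF r).2
        · simp [hb]
        · norm_num [hb]

lemma pvFold_eq_model (rs : List (List (String × String))) :
    rs.foldl pvStep PySem.Dict.empty = pvModel rs := by
  induction rs using List.reverseRecOn with
  | nil => rfl
  | append_singleton rs r ih => rw [List.foldl_append, List.foldl_cons, List.foldl_nil, ih, pvStep_model]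

-- ===== VERDICT (by name: the statement is the Claim_ definition above) =====
theorem collect_skill_script_stats_py_spec : Claim_equal_collect_skill_script_stats_py := by
  intro rs _
  unfold Spec_collect_skill_script_stats_py
  have hA : collect_skill_script_stats_py rs
      = (rs.foldl pvStep PySem.Dict.empty).items.map (fun p => (p.1, p.2.items)) := rfl
  rw [hA, pvFold_eq_model]
  show ((PySem.Dict.mk ((PySem.Set.ofList (pvNames rs)).map (pvG rs))).items).map (fun p => (p.1, p.2.items))
    = (PySem.Dict.counter (pvNames rs)).keys.map (fun name =>
      (name, [("calls", (PySem.Dict.counter (pvNames rs)).getD name 0),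
              ("success_calls", (PySem.Dict.counter (pvSNames rs)).getD name 0)]))
  simp [PySem.Dict.keys_counter, PySem.Dict.getD_counter, List.map_map, pvG]
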